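-- pv_equiv track=rewrite | github.com/Pancio-code/Fondamenti-informatica-I | esami/esame1/ProvaAlCalcolatore/Compito_B/Eserc3/B_Ex3_Sol.py | B_Ex3
-- ===== SOURCE A (Python) =====
-- def B_Ex3(l):
--     massimo=0
--     lista=[]
--     for e in l:
--         cont=0
--         for c in e:
--             if c.islower():
--                 cont+=1
--         if cont>massimo:
--             massimo=cont
--             lista=[e]
--         elif cont==massimo:
--             lista.append(e)
--     i=0
--     while i < len(l):
--         if l[i] in lista:
--             l=l[:i+1]+[l[i]]+l[i+1:]
--             i=i+2
--         else:
--             i=i+1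
--     return l
-- ===== SOURCE B (Python) =====
-- def B_Ex3(l):
--     counts = [sum(1 for c in e if c.islower()) for e in l]
--     m = max(counts, default=0)
--     return [x for e, c in zip(l, counts)
--               for x in ((e, e) if c == m else (e,))]
-- ===== Notes on version B (the rewrite author's own statement) =====
-- stated objective: simpler
-- what changed: Replaces A's running-max fold with reset/append plus an in-place index-jumping splice loop (each duplication rebuilds the list) by one pass computing all lowercase counts, a max with default 0, and a single forward zip/flatMap that emits each element once or twice.
import Mathlib
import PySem

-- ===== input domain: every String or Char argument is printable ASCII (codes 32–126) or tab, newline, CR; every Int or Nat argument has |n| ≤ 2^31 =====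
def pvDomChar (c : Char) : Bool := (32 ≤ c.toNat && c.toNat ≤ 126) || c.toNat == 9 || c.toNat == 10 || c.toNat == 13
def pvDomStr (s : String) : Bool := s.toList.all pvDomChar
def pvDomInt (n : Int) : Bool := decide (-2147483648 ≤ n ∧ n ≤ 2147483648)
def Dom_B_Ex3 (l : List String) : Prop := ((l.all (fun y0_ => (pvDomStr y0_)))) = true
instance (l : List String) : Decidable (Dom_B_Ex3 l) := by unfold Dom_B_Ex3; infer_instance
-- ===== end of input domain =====

-- B replaces A's running-max fold plus in-place index-jumping splice loop by one count pass,
-- a max with default 0, and a single forward flatMap that emits each element once or twice (objective: simpler).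

-- ===== PORT A =====
-- inner `for c in e: if c.islower(): cont += 1`
def pvContA (e : String) : Int :=
  e.toList.foldl (fun cont c => if PySem.Chars.islower c then cont + 1 else cont) 0

-- the `for e in l` loop updating (massimo, lista)
def pvStepA (st : Int × List String) (e : String) : Int × List String :=
  let cont := pvContA e
  if cont > st.1 then (cont, [e])
  else if cont = st.1 then (st.1, st.2 ++ [e])
  else st

-- the `while i < len(l)` splice loop (i stays ≥ 0 in Python, so a Nat index is exact)
def pvDupLoopA (lista : List String) (l : List String) (i : Nat) : List String :=
  if h : i < l.length then
    if l[i] ∈ lista then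
      pvDupLoopA lista (l.take (i+1) ++ [l[i]] ++ l.drop (i+1)) (i+2)
    else
      pvDupLoopA lista l (i+1)
  else l
termination_by l.length - i
decreasing_by
  · simp [List.length_take, List.length_drop]; omega
  · omega

def B_Ex3 (l : List String) : List String :=
  let st := l.foldl pvStepA (0, [])
  pvDupLoopA st.2 l 0

-- ===== PORT B =====
-- `sum(1 for c in e if c.islower())`
def pvCntB (e : String) : Int :=
  ((e.toList.filter PySem.Chars.islower).length : Int)

def B_Ex3_alt (l : List String) : List String :=
  let counts := l.map pvCntB
  let m := (PySem.List.max? counts (fun x => x)).getD 0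
  (l.zip counts).flatMap (fun ec => if ec.2 = m then [ec.1, ec.1] else [ec.1])

-- ===== PRECONDITION & SPEC =====
def Spec_B_Ex3 (l : List String) (out : List String) : Prop := out = B_Ex3_alt l
instance (l : List String) (out : List String) : Decidable (Spec_B_Ex3 l out) := by unfold Spec_B_Ex3; infer_instance

-- ===== CLAIM (what is proved, stated in full; the proofs are below) =====
def Claim_equal_B_Ex3 : Prop := ∀ (l : List String), Dom_B_Ex3 l → Spec_B_Ex3 l (B_Ex3 l)

-- ===== LEMMAS AND PROOFS =====

-- A's inner char loop counts exactly the lowercase chars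
theorem contA_eq (e : String) : pvContA e = pvCntB e := by
  have h : ∀ (cs : List Char) (n : Int),
      cs.foldl (fun cont c => if PySem.Chars.islower c then cont + 1 else cont) n
        = n + ((cs.filter PySem.Chars.islower).length : Int) := by
    intro cs
    induction cs with
    | nil => simp
    | cons c cs ih =>
        intro n
        by_cases hc : PySem.Chars.islower c = true <;>
          simp [List.foldl_cons, hc, ih]; omega
  simpa [pvContA, pvCntB] using h e.toList 0

def pvRunMax (m : Int) (rest : List String) : Int :=
  rest.foldl (fun a e => max a (pvCntB e)) m

theorem cnt_nonneg (e : String) : 0 ≤ pvCntB e := by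
  simp [pvCntB]

theorem le_runMax (m : Int) (rest : List String) : m ≤ pvRunMax m rest := by
  induction rest generalizing m with
  | nil => simp [pvRunMax]
  | cons e rest ih =>
      exact le_trans (le_max_left _ _) (ih (max m (pvCntB e)))

theorem runMax_of_all_le (rest : List String) (m : Int)
    (h : rest.all (fun e => decide (pvCntB e ≤ m)) = true) : pvRunMax m rest = m := by
  induction rest generalizing m with
  | nil => rfl
  | cons e rest ih =>
      simp only [List.all_cons, Bool.and_eq_true, decide_eq_true_eq] at h
      have : max m (pvCntB e) = m := max_eq_left h.1
      simpa [pvRunMax, this] using ih m (by simpa using h.2)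

theorem runMax_gt_of_not_all (rest : List String) (m : Int)
    (h : ¬ rest.all (fun e => decide (pvCntB e ≤ m)) = true) : m < pvRunMax m rest := by
  induction rest generalizing m with
  | nil => simp at h
  | cons e rest ih =>
      by_cases he : pvCntB e ≤ m
      · have h' : ¬ rest.all (fun e => decide (pvCntB e ≤ m)) = true := by
          simpa [List.all_cons, he] using h
        have := ih m h'
        calc m < pvRunMax m rest := this
          _ ≤ pvRunMax (max m (pvCntB e)) rest := by
              simp [max_eq_left he, pvRunMax]
      · have : m < max m (pvCntB e) := by omega
        exact lt_of_lt_of_le this (le_runMax _ _)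

-- characterisation of A's first loop
theorem foldA_spec (rest : List String) (m : Int) (L : List String) :
    rest.foldl pvStepA (m, L) =
      (pvRunMax m rest,
       if rest.all (fun e => decide (pvCntB e ≤ m)) = true
       then L ++ rest.filter (fun e => pvCntB e == m)
       else rest.filter (fun e => pvCntB e == pvRunMax m rest)) := by
  induction rest generalizing m L with
  | nil => simp [pvRunMax]
  | cons e rest ih =>
      have hstep : ∀ st, List.foldl pvStepA st (e :: rest) = List.foldl pvStepA (pvStepA st e) rest :=
        fun st => rfl
      rw [hstep]
      have hrm : pvRunMax m (e :: rest) = pvRunMax (max m (pvCntB e)) rest := by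
        simp [pvRunMax, List.foldl_cons]
      rcases lt_trichotomy (pvCntB e) m with hc | hc | hc
      · -- cont < massimo : state unchanged
        have hstA : pvStepA (m, L) e = (m, L) := by
          simp [pvStepA, contA_eq, not_lt.mpr (le_of_lt hc), ne_of_lt hc]
        rw [hstA, ih]
        have hmax : max m (pvCntB e) = m := max_eq_left (le_of_lt hc)
        by_cases hall : rest.all (fun e => decide (pvCntB e ≤ m)) = true
        · simp [hrm, hall, List.all_cons, le_of_lt hc,
            (by simpa using ne_of_lt hc : ¬ (pvCntB e == m) = true)]
        · have hgt := runMax_gt_of_not_all rest m hall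
          have hne : ¬ (pvCntB e == pvRunMax m rest) = true := by
            simp; omega
          simp [hrm, hall, List.all_cons, le_of_lt hc, hne]
      · -- cont == massimo : append
        have hstA : pvStepA (m, L) e = (m, L ++ [e]) := by
          simp [pvStepA, contA_eq, hc]
        rw [hstA, ih]
        have hmax : max m (pvCntB e) = m := by omega
        by_cases hall : rest.all (fun e' => decide (pvCntB e' ≤ m)) = true
        · simp [hrm, hall, List.all_cons, hc]
        · have hgt := runMax_gt_of_not_all rest m hall
          have hne : ¬ (pvCntB e == pvRunMax m rest) = true := by
            simp; omega
          simp [hrm, hall, List.all_cons, le_of_eq hc, hne]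
      · -- cont > massimo : reset
        have hstA : pvStepA (m, L) e = (pvCntB e, [e]) := by
          simp [pvStepA, contA_eq, hc]
        rw [hstA, ih]
        have hmax : max m (pvCntB e) = pvCntB e := by omega
        have hnall : ¬ (e :: rest).all (fun e' => decide (pvCntB e' ≤ m)) = true := by
          simp [List.all_cons]; intro h; omega
        by_cases hall : rest.all (fun e' => decide (pvCntB e' ≤ pvCntB e)) = true
        · have hr : pvRunMax (pvCntB e) rest = pvCntB e := runMax_of_all_le rest _ hall
          simp [hrm, hmax, hnall, hall, hr]
        · have hgt := runMax_gt_of_not_all rest (pvCntB e) hall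
          have hne : ¬ (pvCntB e == pvRunMax (pvCntB e) rest) = true := by
            simp; omega
          simp [hrm, hmax, hnall, hall, hne]

def pvM (l : List String) : Int := (PySem.List.max? (l.map pvCntB) (fun x => x)).getD 0

theorem runMax_zero_eq_pvM (l : List String) : pvRunMax 0 l = pvM l := by
  cases l with
  | nil => simp [pvRunMax, pvM, PySem.List.max?]
  | cons e t =>
      have h0 : max 0 (pvCntB e) = pvCntB e := max_eq_right (cnt_nonneg e)
      simp [pvRunMax, pvM, List.foldl_cons, PySem.List.max?_id_cons, h0, List.foldl_map]

theorem mem_L0 (l : List String) (e : String) :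
    e ∈ (l.foldl pvStepA (0, ([] : List String))).2 ↔ (e ∈ l ∧ pvCntB e = pvM l) := by
  rw [foldA_spec, ← runMax_zero_eq_pvM]
  by_cases hall : l.all (fun e' => decide (pvCntB e' ≤ 0)) = true
  · have h0 : pvRunMax 0 l = 0 := runMax_of_all_le l 0 hall
    simp only [hall, if_true, List.nil_append, List.mem_filter, h0, beq_iff_eq]
  · simp [hall, List.mem_filter]

theorem dupLoop_spec (lista : List String) (M : Int) (k : Nat) :
    ∀ (cur : List String) (i : Nat), cur.length - i ≤ k →
    (∀ e ∈ cur, (e ∈ lista ↔ pvCntB e = M)) →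
    pvDupLoopA lista cur i =
      cur.take i ++ (cur.drop i).flatMap (fun e => if pvCntB e = M then [e, e] else [e]) := by
  induction k with
  | zero =>
      intro cur i hk _
      have hle : cur.length ≤ i := by omega
      rw [pvDupLoopA]
      simp [not_lt.mpr hle, List.take_of_length_le hle, List.drop_eq_nil_of_le hle]
  | succ k ih =>
      intro cur i hk hmem
      by_cases h : i < cur.length
      · have hx : cur.drop i = cur[i] :: cur.drop (i + 1) := (List.getElem_cons_drop h).symm
        by_cases hin : cur[i] ∈ lista
        · -- duplicate branch
          set x := cur[i] with hxdef
          have hcnt : pvCntB x = M := (hmem x (by simp [hxdef])).1 hin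
          rw [pvDupLoopA, dif_pos h, if_pos hin]
          set cur' := cur.take (i+1) ++ [x] ++ cur.drop (i+1) with hcur'
          have hlen1 : (cur.take (i+1)).length = i + 1 := by
            simp [List.length_take]; omega
          have hlen' : cur'.length = cur.length + 1 := by
            simp only [hcur', List.length_append, List.length_take, List.length_drop,
              List.length_cons, List.length_nil]
            omega
          have hmem' : ∀ e ∈ cur', (e ∈ lista ↔ pvCntB e = M) := by
            intro e he
            apply hmem
            simp only [hcur', List.mem_append] at he
            rcases he with (he | he) | he
            · exact List.mem_of_mem_take he
            · simp at he; subst he; exact List.getElem_mem h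
            · exact List.mem_of_mem_drop he
          rw [ih cur' (i+2) (by omega) hmem']
          have htake : cur'.take (i+2) = cur.take (i+1) ++ [x] := by
            rw [hcur', List.append_assoc, List.take_append, hlen1]
            simp
          have hdrop : cur'.drop (i+2) = cur.drop (i+1) := by
            rw [hcur', List.append_assoc, List.drop_append, hlen1]
            simp
          have htake1 : cur.take (i+1) = cur.take i ++ [x] := by
            rw [List.take_add_one]
            simp [List.getElem?_eq_getElem h, hxdef]
          rw [htake, hdrop, htake1, hx]
          simp [hcnt]
        · -- no duplicate
          have hcnt : pvCntB cur[i] ≠ M := fun hc => hin ((hmem cur[i] (by simp)).2 hc)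
          rw [pvDupLoopA, dif_pos h, if_neg hin, ih cur (i+1) (by omega) hmem]
          have htake1 : cur.take (i+1) = cur.take i ++ [cur[i]] := by
            rw [List.take_add_one]
            simp [List.getElem?_eq_getElem h]
          rw [hx, List.flatMap_cons, if_neg hcnt, htake1]
          simp only [List.append_assoc, List.cons_append, List.nil_append]
      · have hle : cur.length ≤ i := by omega
        rw [pvDupLoopA]
        simp [not_lt.mpr hle, List.take_of_length_le hle, List.drop_eq_nil_of_le hle]

theorem alt_eq_flatMap (l : List String) :
    B_Ex3_alt l = l.flatMap (fun e => if pvCntB e = pvM l then [e, e] else [e]) := by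
  have hz : l.zip (l.map pvCntB) = l.map (fun e => (e, pvCntB e)) := by
    induction l with
    | nil => rfl
    | cons e t ih => simp [ih]
  simp only [B_Ex3_alt, pvM, hz, List.flatMap_map]
  rfl

-- ===== VERDICT (by name: the statement is the Claim_ definition above) =====
theorem B_Ex3_spec : Claim_equal_B_Ex3 := by
  intro l _
  unfold Spec_B_Ex3 B_Ex3
  rw [alt_eq_flatMap]
  have := dupLoop_spec (l.foldl pvStepA (0, [])).2 (pvM l) l.length l 0 (by omega)
    (fun e he => by simpa [he] using mem_L0 l e)
  simpa using this
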